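-- pv_equiv track=rewrite | github.com/googlefonts/glyphsLib | Lib/glyphsLib/builder/names.py | build_stylemap_names
-- ===== SOURCE A (Python) =====
-- from collections import deque
--
-- def build_stylemap_names(family_name, style_name, is_bold=False,
--                          is_italic=False, linked_style=None):
--     """Build UFO `styleMapFamilyName` and `styleMapStyleName` based on the
--     family and style names, and the entries in the "Style Linking" section
--     of the "Instances" tab in the "Font Info".
--
--     The value of `styleMapStyleName` can be either "regular", "bold", "italic"
--     or "bold italic", depending on the values of `is_bold` and `is_italic`.
--
--     The `styleMapFamilyName` is a combination of the `family_name` and the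
--     `linked_style`.
--
--     If `linked_style` is unset or set to 'Regular', the linked style is equal
--     to the style_name with the last occurrences of the strings 'Regular',
--     'Bold' and 'Italic' stripped from it.
--     """
--
--     styleMapStyleName = ' '.join(s for s in (
--         'bold' if is_bold else '',
--         'italic' if is_italic else '') if s) or 'regular'
--     if not linked_style or linked_style == 'Regular':
--         linked_style = _get_linked_style(style_name, is_bold, is_italic)
--     if linked_style:
--         styleMapFamilyName = family_name + ' ' + linked_style
--     else:
--         styleMapFamilyName = family_name
--     return styleMapFamilyName, styleMapStyleName
--
-- def _get_linked_style(style_name, is_bold, is_italic):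
--     # strip last occurrence of 'Regular', 'Bold', 'Italic' from style_name
--     # depending on the values of is_bold and is_italic
--     linked_style = deque()
--     is_regular = not (is_bold or is_italic)
--     for part in reversed(style_name.split()):
--         if part == 'Regular' and is_regular:
--             is_regular = False
--         elif part == 'Bold' and is_bold:
--             is_bold = False
--         elif part == 'Italic' and is_italic:
--             is_italic = False
--         else:
--             linked_style.appendleft(part)
--     return ' '.join(linked_style)
-- ===== SOURCE B (Python) =====
-- def build_stylemap_names(family_name, style_name, is_bold=False,
--                          is_italic=False, linked_style=None):
--     styleMapStyleName = ('bold italic' if is_bold and is_italic else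
--                          'bold' if is_bold else
--                          'italic' if is_italic else 'regular')
--     if not linked_style or linked_style == 'Regular':
--         rev = style_name.split()[::-1]
--         active = [m for m, f in (('Regular', not (is_bold or is_italic)),
--                                  ('Bold', is_bold),
--                                  ('Italic', is_italic)) if f]
--         for marker in active:
--             if marker in rev:
--                 rev.remove(marker)
--         linked_style = ' '.join(reversed(rev))
--     if linked_style:
--         return family_name + ' ' + linked_style, styleMapStyleName
--     return family_name, styleMapStyleName
-- ===== Notes on version B (the rewrite author's own statement) =====
-- stated objective: simpler
-- what changed: Replaces A's single reverse pass with a deque and three mutable flags by independent list.remove calls: split, reverse, remove the first occurrence of each active marker ('Regular'/'Bold'/'Italic') from the reversed token list, reverse back and join; the styleMapStyleName join-or-'regular' idiom becomes a plain conditional chain.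
import Mathlib
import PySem

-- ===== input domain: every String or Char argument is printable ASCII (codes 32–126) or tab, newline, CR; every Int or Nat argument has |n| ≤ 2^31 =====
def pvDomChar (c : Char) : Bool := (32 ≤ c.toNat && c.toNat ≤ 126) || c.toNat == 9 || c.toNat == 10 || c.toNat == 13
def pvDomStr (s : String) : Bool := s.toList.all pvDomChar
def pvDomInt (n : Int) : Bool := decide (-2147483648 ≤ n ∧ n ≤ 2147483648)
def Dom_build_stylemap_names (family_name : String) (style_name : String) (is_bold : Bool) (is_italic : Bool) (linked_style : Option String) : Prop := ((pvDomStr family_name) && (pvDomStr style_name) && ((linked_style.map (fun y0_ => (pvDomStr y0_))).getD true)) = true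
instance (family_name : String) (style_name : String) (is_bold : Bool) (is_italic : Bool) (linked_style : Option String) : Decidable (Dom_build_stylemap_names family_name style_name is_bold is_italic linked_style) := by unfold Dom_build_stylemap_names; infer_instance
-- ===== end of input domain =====

-- B replaces A's single reverse-pass flag state machine by independent first-occurrence
-- removals on the reversed token list (objective: simpler decomposition, same cost).

-- ===== PORT A =====
-- _get_linked_style's loop over reversed(style_name.split()) with deque.appendleft:
-- q is the reversed token list; a kept token p ends up at the RIGHT of the tokens kept later.
def bsnStrip : List String → Bool → Bool → Bool → List String
  | [], _, _, _ => []
  | p :: ps, r, b, i =>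
    if p = "Regular" ∧ r then bsnStrip ps false b i
    else if p = "Bold" ∧ b then bsnStrip ps r false i
    else if p = "Italic" ∧ i then bsnStrip ps r b false
    else bsnStrip ps r b i ++ [p]

def bsnGetLinkedStyle (style_name : String) (is_bold : Bool) (is_italic : Bool) : String :=
  PySem.Str.join " " (bsnStrip (PySem.Str.split₀ style_name).reverse (!(is_bold || is_italic)) is_bold is_italic)

def build_stylemap_names (family_name : String) (style_name : String) (is_bold : Bool) (is_italic : Bool) (linked_style : Option String) : String × String :=
  let j := PySem.Str.join " " (([(if is_bold then "bold" else ""), (if is_italic then "italic" else "")]).filter (fun s => s ≠ ""))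
  let styleMapStyleName := if j = "" then "regular" else j
  let ls : String := match linked_style with
    | none => bsnGetLinkedStyle style_name is_bold is_italic
    | some s => if s = "" ∨ s = "Regular" then bsnGetLinkedStyle style_name is_bold is_italic else s
  if ls ≠ "" then (family_name ++ " " ++ ls, styleMapStyleName)
  else (family_name, styleMapStyleName)

-- ===== PORT B =====
def bsnAltLinked (style_name : String) (is_bold : Bool) (is_italic : Bool) : String :=
  let rev := (PySem.Str.split₀ style_name).reverse
  let active := ([("Regular", !(is_bold || is_italic)), ("Bold", is_bold), ("Italic", is_italic)].filter (fun mf => mf.2)).map (fun mf => mf.1)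
  let rev := active.foldl (fun acc m => if m ∈ acc then acc.erase m else acc) rev
  PySem.Str.join " " rev.reverse

def build_stylemap_names_alt (family_name : String) (style_name : String) (is_bold : Bool) (is_italic : Bool) (linked_style : Option String) : String × String :=
  let styleMapStyleName :=
    if is_bold ∧ is_italic then "bold italic"
    else if is_bold then "bold"
    else if is_italic then "italic"
    else "regular"
  let ls : String := match linked_style with
    | none => bsnAltLinked style_name is_bold is_italic
    | some s => if s = "" ∨ s = "Regular" then bsnAltLinked style_name is_bold is_italic else s
  if ls ≠ "" then (family_name ++ " " ++ ls, styleMapStyleName)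
  else (family_name, styleMapStyleName)

-- ===== PRECONDITION & SPEC =====
def Spec_build_stylemap_names (family_name : String) (style_name : String) (is_bold : Bool) (is_italic : Bool) (linked_style : Option String) (out : String × String) : Prop := out = build_stylemap_names_alt family_name style_name is_bold is_italic linked_style
instance (family_name : String) (style_name : String) (is_bold : Bool) (is_italic : Bool) (linked_style : Option String) (out : String × String) : Decidable (Spec_build_stylemap_names family_name style_name is_bold is_italic linked_style out) := by unfold Spec_build_stylemap_names; infer_instance

-- ===== CLAIM (what is proved, stated in full; the proofs are below) =====
def Claim_equal_build_stylemap_names : Prop := ∀ (family_name : String) (style_name : String) (is_bold : Bool) (is_italic : Bool) (linked_style : Option String), Dom_build_stylemap_names family_name style_name is_bold is_italic linked_style → Spec_build_stylemap_names family_name style_name is_bold is_italic linked_style (build_stylemap_names family_name style_name is_bold is_italic linked_style)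

-- ===== LEMMAS AND PROOFS =====

def erIf (f : Bool) (t : String) (q : List String) : List String := if f then q.erase t else q

theorem erIf_cons_of_ne (f : Bool) (t p : String) (ps : List String) (h : f = true → p ≠ t) :
    erIf f t (p :: ps) = p :: erIf f t ps := by
  unfold erIf
  cases f with
  | false => simp
  | true => simp [(by simpa using h rfl : (p == t) = false)]

theorem strip_eq (q : List String) (r b i : Bool) :
    bsnStrip q r b i = (erIf i "Italic" (erIf b "Bold" (erIf r "Regular" q))).reverse := by
  induction q generalizing r b i with
  | nil => simp [bsnStrip, erIf]
  | cons p ps ih =>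
    by_cases h1 : p = "Regular" ∧ r
    · obtain ⟨hp, hr⟩ := h1
      subst hp
      simp [bsnStrip, hr, ih, erIf]
    · by_cases h2 : p = "Bold" ∧ b
      · obtain ⟨hp, hb⟩ := h2
        subst hp
        rw [show bsnStrip ("Bold" :: ps) r b i = bsnStrip ps r false i by
          simp [bsnStrip, hb]]
        rw [ih, erIf_cons_of_ne r "Regular" "Bold" ps (by intro _; decide)]
        simp [hb, erIf]
      · by_cases h3 : p = "Italic" ∧ i
        · obtain ⟨hp, hi⟩ := h3
          subst hp
          rw [show bsnStrip ("Italic" :: ps) r b i = bsnStrip ps r b false by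
            simp [bsnStrip, hi]]
          rw [ih, erIf_cons_of_ne r "Regular" "Italic" ps (by intro _; decide),
              erIf_cons_of_ne b "Bold" "Italic" (erIf r "Regular" ps) (by intro _; decide)]
          simp [hi, erIf]
        · rw [show bsnStrip (p :: ps) r b i = bsnStrip ps r b i ++ [p] by
            simp [bsnStrip, h1, h2, h3]]
          rw [ih,
              erIf_cons_of_ne r "Regular" p ps (fun hr hp => h1 ⟨hp, hr⟩),
              erIf_cons_of_ne b "Bold" p (erIf r "Regular" ps) (fun hb hp => h2 ⟨hp, hb⟩),
              erIf_cons_of_ne i "Italic" p (erIf b "Bold" (erIf r "Regular" ps)) (fun hi hp => h3 ⟨hp, hi⟩)]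
          simp

theorem erase_step (acc : List String) (m : String) :
    (if m ∈ acc then acc.erase m else acc) = acc.erase m := by
  split
  · rfl
  · exact (List.erase_of_not_mem (by assumption)).symm

theorem linked_eq (s : String) (b i : Bool) :
    bsnGetLinkedStyle s b i = bsnAltLinked s b i := by
  unfold bsnGetLinkedStyle bsnAltLinked
  cases b <;> cases i <;>
    simp [strip_eq, erIf, List.filter, List.foldl, erase_step]

theorem style_eq (b i : Bool) :
    (if (PySem.Str.join " " (([(if b then "bold" else ""), (if i then "italic" else "")]).filter (fun s => s ≠ ""))) = "" then "regular"
     else (PySem.Str.join " " (([(if b then "bold" else ""), (if i then "italic" else "")]).filter (fun s => s ≠ "")))) =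
    (if b ∧ i then "bold italic" else if b then "bold" else if i then "italic" else "regular") := by
  cases b <;> cases i <;> decide

-- ===== VERDICT (by name: the statement is the Claim_ definition above) =====
theorem build_stylemap_names_spec : Claim_equal_build_stylemap_names := by
  intro family_name style_name is_bold is_italic linked_style _
  unfold Spec_build_stylemap_names
  simp only [build_stylemap_names, build_stylemap_names_alt, linked_eq, style_eq]
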